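-- pv_equiv track=rewrite | github.com/giladfuchs/algo-expert-leet-code-soloution | hacker_rank/exam.py | solution
-- ===== SOURCE A (Python) =====
-- from collections import defaultdict
-- from collections import defaultdict
--
-- def solution(arr):
--     d = defaultdict(list)
--     d[arr[0] + arr[1]].append(0)
--     for i in range(1, len(arr) - 1):
--         temp1 = arr[i] + arr[i + 1]
--         if i - 1 not in d[temp1]:
--             d[temp1].append(i)
--
--     return len(max(d.values(), key=len))
-- ===== SOURCE B (Python) =====
-- def solution(arr):
--     # Two stages: materialise the adjacent-pair sums, then run-length encode them;
--     # a maximal run of L equal consecutive sums contributes (L + 1) // 2 picks to that sum.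
--     sums = [arr[i] + arr[i + 1] for i in range(len(arr) - 1)]
--     counts = {}
--     i = 0
--     while i < len(sums):
--         j = i + 1
--         while j < len(sums) and sums[j] == sums[i]:
--             j += 1
--         counts[sums[i]] = counts.get(sums[i], 0) + (j - i + 1) // 2
--         i = j
--     return max(counts.values())
-- ===== Notes on version B (the rewrite author's own statement) =====
-- stated objective: faster
-- what changed: B is a two-stage linear algorithm: it first materialises the list of adjacent-pair sums, then run-length encodes it, adding (L+1)//2 per maximal run of L equal consecutive sums to that sum's count, instead of A's per-index greedy selection into per-sum index lists scanned by membership on every step.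
-- outside the precondition, e.g. on solution([5]): A raises IndexError, B raises ValueError
import Mathlib
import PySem

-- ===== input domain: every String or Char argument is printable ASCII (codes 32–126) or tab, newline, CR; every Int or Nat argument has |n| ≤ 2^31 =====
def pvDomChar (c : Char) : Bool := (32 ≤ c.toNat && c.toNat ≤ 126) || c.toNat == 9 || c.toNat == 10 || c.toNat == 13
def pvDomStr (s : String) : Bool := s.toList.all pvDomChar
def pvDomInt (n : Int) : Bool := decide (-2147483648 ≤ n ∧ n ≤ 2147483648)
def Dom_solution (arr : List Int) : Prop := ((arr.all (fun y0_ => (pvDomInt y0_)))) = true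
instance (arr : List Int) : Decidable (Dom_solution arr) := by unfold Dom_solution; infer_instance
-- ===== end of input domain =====

-- B is a two-stage algorithm: it materialises the adjacent-pair sums and run-length encodes
-- them, a maximal run of L equal consecutive sums contributing (L+1)//2 to that sum's count,
-- instead of A's greedy per-index selection into per-sum index lists scanned by membership.

-- ===== PORT A =====
-- arr[i]; under Pre_ every access the programs make is in range, so the default is never used
def pyGetD0 (arr : List Int) (i : Int) : Int := (PySem.List.pyGet? arr i).getD 0

-- loop body of A; the defaultdict access d[temp1] creates the entry before the membership test
def stepA (arr : List Int) (d : PySem.Dict Int (List Int)) (i : Int) : PySem.Dict Int (List Int) :=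
  let temp1 := pyGetD0 arr i + pyGetD0 arr (i + 1)
  let d := if d.contains temp1 then d else d.insert temp1 []
  let l := d.getD temp1 []
  if l.contains (i - 1) then d else d.insert temp1 (l ++ [i])

def solution (arr : List Int) : Int :=
  let d0 := (PySem.Dict.empty : PySem.Dict Int (List Int)).insert (pyGetD0 arr 0 + pyGetD0 arr 1) [0]
  let d := (PySem.List.pyRange 1 ((arr.length : Int) - 1) 1).foldl (stepA arr) d0
  match PySem.List.max? d.values (fun l => l.length) with
  | some m => (m.length : Int)
  | none => 0   -- unreachable under Pre_ (Python raises there)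

-- ===== PORT B =====
-- sums = [arr[i] + arr[i+1] for i in range(len(arr)-1)]
def sumsList (arr : List Int) : List Int :=
  (PySem.List.pyRange 0 ((arr.length : Int) - 1) 1).map (fun i => pyGetD0 arr i + pyGetD0 arr (i + 1))

-- the index-scanning while loops of Source B as the obvious recursion consuming one maximal run
-- (the inner 'while sums[j] == sums[i]' scan is the takeWhile, 'i = j' is the dropWhile)
def runLoop : List Int → PySem.Dict Int Int → PySem.Dict Int Int
  | [], c => c
  | s :: rest, c =>
      runLoop (rest.dropWhile (fun x => x == s))
        (c.insert s (c.getD s 0 +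
          PySem.Int.floordiv (((rest.takeWhile (fun x => x == s)).length : Int) + 2) 2))
termination_by l _ => l.length
decreasing_by simpa using Nat.lt_succ_of_le (List.length_dropWhile_le _ _)

def solution_alt (arr : List Int) : Int :=
  match PySem.List.max? (runLoop (sumsList arr) PySem.Dict.empty).values (fun x => x) with
  | some v => v
  | none => 0   -- unreachable under Pre_ (Python raises there)

-- ===== PRECONDITION & SPEC =====
-- Pre_ excludes lists shorter than two elements: there A raises IndexError reading the first pair (and B raises ValueError on max() of an empty sequence)
def Pre_solution (arr : List Int) : Prop := 2 ≤ arr.length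
instance (arr : List Int) : Decidable (Pre_solution arr) := by unfold Pre_solution; infer_instance
def pvWitness_solution : List Int := ([1, 2, 3, 1, 4] : List Int)

def Spec_solution (arr : List Int) (out : Int) : Prop := out = solution_alt arr
instance (arr : List Int) (out : Int) : Decidable (Spec_solution arr out) := by unfold Spec_solution; infer_instance

-- ===== CLAIM (what is proved, stated in full; the proofs are below) =====
def Claim_equal_solution : Prop := ∀ (arr : List Int), Dom_solution arr → Pre_solution arr → Spec_solution arr (solution arr)

-- ===== LEMMAS AND PROOFS =====

-- the sum A computes at loop index i (= temp1 = sums[i] on B's side)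
def pairSum (arr : List Int) (i : Int) : Int := pyGetD0 arr i + pyGetD0 arr (i + 1)

-- invariant value relation at boundary i: B's count is the length of A's index list,
-- whose elements are picked positions < i with this pair sum, bounded by the last element
def RelI (arr : List Int) (i k : Int) : Option (List Int) → Option Int → Prop
  | none, none => True
  | some l, some cnt => cnt = (l.length : Int) ∧ ∃ t, l.getLast? = some t ∧
      ∀ x ∈ l, x ≤ t ∧ 0 ≤ x ∧ x < i ∧ pairSum arr x = k
  | _, _ => False

def LoopInv (arr : List Int) (i : Int) (d : PySem.Dict Int (List Int)) (c : PySem.Dict Int Int) : Prop :=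
  d.keys = c.keys ∧ d.keys.Nodup ∧ ∀ k, RelI arr i k (d.get? k) (c.get? k)

-- final relation: counts are list lengths
def RelF : Option (List Int) → Option Int → Prop
  | none, none => True
  | some l, some cnt => cnt = (l.length : Int)
  | _, _ => False

def FinRel (d : PySem.Dict Int (List Int)) (c : PySem.Dict Int Int) : Prop :=
  d.keys = c.keys ∧ d.keys.Nodup ∧ ∀ k, RelF (d.get? k) (c.get? k)

theorem get?_some_of_contains {κ ν : Type} [BEq κ] (d : PySem.Dict κ ν) {k : κ}
    (h : d.contains k = true) : ∃ v, d.get? k = some v := by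
  have hs := PySem.Dict.contains_eq_isSome_get? d k
  rw [h] at hs
  exact Option.isSome_iff_exists.mp hs.symm

theorem getLast?_append_right {l l' : List Int} (h : l' ≠ []) :
    (l ++ l').getLast? = l'.getLast? := by
  rw [List.getLast?_append]
  cases h2 : l'.getLast? with
  | none => exact absurd (List.getLast?_eq_none_iff.mp h2) h
  | some t => rfl

-- A's step when the last recorded index (if any) for this sum is ≤ i-2: it picks i
theorem stepA_pick (arr : List Int) (d : PySem.Dict Int (List Int)) (i s : Int)
    (hs : pairSum arr i = s)
    (hprev : ∀ l, d.get? s = some l → ∀ x ∈ l, x ≤ i - 2) :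
    stepA arr d i = d.insert s (d.getD s [] ++ [i]) := by
  have hs' : pyGetD0 arr i + pyGetD0 arr (i + 1) = s := hs
  by_cases hc : d.contains s = true
  · obtain ⟨l, hl⟩ := get?_some_of_contains d hc
    have hgd : d.getD s [] = l := PySem.Dict.getD_of_get?_eq_some _ _ hl
    have hmem : (i - 1) ∉ l := fun hm => by have := hprev l hl _ hm; omega
    simp [stepA, hs', hc, hgd, hmem]
  · have hc' : d.contains s = false := by simpa using hc
    have hgd : d.getD s [] = [] := PySem.Dict.getD_of_not_contains _ _ hc'
    simp [stepA, hs', hc', hgd, PySem.Dict.getD_insert_self, PySem.Dict.insert_insert_self]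

-- A's step when i-1 is recorded for this sum: it skips
theorem stepA_skip (arr : List Int) (d : PySem.Dict Int (List Int)) (i s : Int)
    (hs : pairSum arr i = s) (l : List Int) (hl : d.get? s = some l) (hmem : (i - 1) ∈ l) :
    stepA arr d i = d := by
  have hs' : pyGetD0 arr i + pyGetD0 arr (i + 1) = s := hs
  have hc : d.contains s = true := by
    rw [PySem.Dict.contains_eq_isSome_get?, hl]; rfl
  have hgd : d.getD s [] = l := PySem.Dict.getD_of_get?_eq_some _ _ hl
  simp [stepA, hs', hc, hgd, hmem]

-- A over one maximal run of the same pair sum s of length L starting at i: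
-- it appends ⌈L/2⌉ = (L+1)/2 picked indices at key s and touches nothing else
theorem runA (arr : List Int) (L : Nat) : 1 ≤ L → ∀ (i : Int) (d : PySem.Dict Int (List Int)) (s : Int),
    (∀ j : Int, i ≤ j → j < i + (L : Int) → pairSum arr j = s) →
    (∀ l, d.get? s = some l → ∀ x ∈ l, x ≤ i - 2) →
    ∃ l' t, ((PySem.List.pyRange i (i + (L : Int)) 1).foldl (stepA arr) d)
        = d.insert s ((d.getD s []) ++ l') ∧
      l'.length = (L + 1) / 2 ∧ l'.getLast? = some t ∧ t ≤ i + (L : Int) - 1 ∧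
      ∀ x ∈ l', x ≤ t ∧ i ≤ x := by
  induction L using Nat.strong_induction_on with
  | _ L ih =>
    intro hL i d s hF hprev
    match L, hL with
    | 1, _ =>
      refine ⟨[i], i, ?_, by simp, by simp, by omega, by simp⟩
      rw [show i + ((1 : Nat) : Int) = i + 1 from by push_cast; ring,
        PySem.List.pyRange_one_singleton]
      simp only [List.foldl_cons, List.foldl_nil]
      exact stepA_pick arr d i s (hF i le_rfl (by omega)) hprev
    | (m + 2), _ =>
      -- two steps: pick at i, skip at i+1; then the rest of the run (length m) from i+2
      have hcast : i + ((m + 2 : Nat) : Int) = (i + 2) + (m : Int) := by push_cast; ring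
      have hsplit : PySem.List.pyRange i (i + ((m + 2 : Nat) : Int)) 1
          = i :: (i + 1) :: PySem.List.pyRange (i + 2) ((i + 2) + (m : Int)) 1 := by
        rw [PySem.List.pyRange_one_cons (by omega), PySem.List.pyRange_one_cons (by omega)]
        rw [show i + 1 + 1 = i + 2 from by ring, hcast]
      have h1 : stepA arr d i = d.insert s (d.getD s [] ++ [i]) :=
        stepA_pick arr d i s (hF i le_rfl (by omega)) hprev
      set l0 := d.getD s [] with hl0
      have h2 : stepA arr (d.insert s (l0 ++ [i])) (i + 1) = d.insert s (l0 ++ [i]) := by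
        refine stepA_skip arr _ (i + 1) s (hF (i + 1) (by omega) (by omega)) (l0 ++ [i])
          (PySem.Dict.get?_insert_self _ _ _) (by simp)
      rcases Nat.eq_zero_or_pos m with rfl | hm
      · -- run of length exactly 2
        refine ⟨[i], i, ?_, by simp, by simp, by omega, by simp⟩
        rw [hsplit]
        simp only [List.foldl_cons]
        rw [h1, h2]
        simp [PySem.List.pyRange_one_eq_nil]
      · -- run of length m + 2, m ≥ 1: recurse at i + 2
        have hprev2 : ∀ l, (d.insert s (l0 ++ [i])).get? s = some l → ∀ x ∈ l, x ≤ (i + 2) - 2 := by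
          intro l hl x hx
          rw [PySem.Dict.get?_insert_self] at hl
          cases hl
          rcases List.mem_append.mp hx with hx | hx
          · rcases hget : d.get? s with _ | lo
            · rw [hl0, PySem.Dict.getD_of_get?_eq_none _ _ hget] at hx; simp at hx
            · rw [hl0, PySem.Dict.getD_of_get?_eq_some _ _ hget] at hx
              have := hprev lo hget x hx; omega
          · rw [List.mem_singleton] at hx; omega
        obtain ⟨l'', t'', heq, hlen, hlast, htle, hmem⟩ :=
          ih m (by omega) hm (i + 2) (d.insert s (l0 ++ [i])) s
            (fun j h1' h2' => hF j (by omega) (by omega)) hprev2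
        have hl''ne : l'' ≠ [] := by
          intro h; rw [h] at hlast; simp at hlast
        have ht''ge : i + 2 ≤ t'' := (hmem t'' (List.mem_of_getLast? hlast)).2
        refine ⟨i :: l'', t'', ?_, ?_, ?_, by omega, ?_⟩
        · rw [hsplit]
          simp only [List.foldl_cons]
          rw [h1, h2, heq, PySem.Dict.getD_insert_self, PySem.Dict.insert_insert_self]
          simp
        · simp only [List.length_cons, hlen]; omega
        · cases l'' with
          | nil => exact absurd rfl hl''ne
          | cons a tl => rw [List.getLast?_cons_cons]; exact hlast
        · intro x hx
          rcases List.mem_cons.mp hx with rfl | hx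
          · exact ⟨by omega, le_rfl⟩
          · have := hmem x hx; exact ⟨this.1, by omega⟩

theorem relI_mono (arr : List Int) {i j : Int} (h : i ≤ j) {k : Int} :
    ∀ {o p}, RelI arr i k o p → RelI arr j k o p := by
  intro o p hr
  cases o <;> cases p <;> simp [RelI] at hr ⊢
  obtain ⟨h1, t, h2, h3⟩ := hr
  exact ⟨h1, t, h2, fun x hx => ⟨(h3 x hx).1, (h3 x hx).2.1, by have := (h3 x hx).2.2.1; omega,
    (h3 x hx).2.2.2⟩⟩

-- the main simulation: A's fold over the remaining indices vs B's run loop over the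
-- remaining sums, advancing run by run
theorem mainLoop (arr : List Int) (N : Nat) : ∀ (ss : List Int), ss.length = N →
    ∀ (i : Int) (d : PySem.Dict Int (List Int)) (c : PySem.Dict Int Int),
    0 ≤ i →
    (∀ j : Nat, (hj : j < ss.length) → ss[j] = pairSum arr (i + j)) →
    (∀ s l, ss.head? = some s → d.get? s = some l → ∀ x ∈ l, x ≤ i - 2) →
    LoopInv arr i d c →
    FinRel ((PySem.List.pyRange i (i + (ss.length : Int)) 1).foldl (stepA arr) d) (runLoop ss c)
    ∧ ((d.keys ≠ [] ∨ ss ≠ []) →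
        ((PySem.List.pyRange i (i + (ss.length : Int)) 1).foldl (stepA arr) d).keys ≠ []) := by
  induction N using Nat.strong_induction_on with
  | _ N ih =>
    intro ss hN i d c hi hss hb hinv
    cases ss with
    | nil =>
      rw [show i + (([] : List Int).length : Int) = i from by simp,
        PySem.List.pyRange_one_eq_nil le_rfl]
      simp only [List.foldl_nil, runLoop]
      obtain ⟨hk, hnd, hv⟩ := hinv
      refine ⟨⟨hk, hnd, fun k => ?_⟩, fun h => by simpa using h⟩
      have := hv k
      cases hd : d.get? k <;> cases hc : c.get? k <;> rw [hd, hc] at this <;>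
        simp [RelI, RelF] at this ⊢
      exact this.1
    | cons s rest =>
      obtain ⟨hk, hnd, hv⟩ := hinv
      set run := rest.takeWhile (fun x => x == s) with hrun
      set rest' := rest.dropWhile (fun x => x == s) with hrest'
      have hdecomp : run ++ rest' = rest := List.takeWhile_append_dropWhile
      set L := run.length + 1 with hLdef
      -- every index in [i, i+L) has pair sum s
      have hF : ∀ j : Int, i ≤ j → j < i + (L : Int) → pairSum arr j = s := by
        intro j h1 h2
        obtain ⟨k, rfl⟩ : ∃ k : Nat, j = i + k := ⟨(j - i).toNat, by omega⟩
        have hkL : k < L := by omega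
        cases k with
        | zero => have := hss 0 (by simp); simpa using this.symm
        | succ k' =>
          have hk' : k' < run.length := by omega
          have hkrest : k' < rest.length := by rw [← hdecomp]; simp; omega
          have hps : run[k'] = s := by
            have hmemrun : run[k'] ∈ rest.takeWhile (fun x => x == s) := by
              rw [← hrun]; exact List.getElem_mem _
            have := List.mem_takeWhile_imp hmemrun
            simpa using this
          have hr? : rest[k']? = some s := by
            rw [← hdecomp, List.getElem?_append_left (by simpa using hk'),
              List.getElem?_eq_getElem hk', hps]
          have hreq : rest[k'] = s := by
            rw [List.getElem?_eq_getElem hkrest] at hr?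
            exact Option.some.inj hr?
          have := hss (k' + 1) (by simp; omega)
          simp only [List.getElem_cons_succ] at this
          rw [hreq] at this
          exact this.symm
      -- A over the run
      have hbs : ∀ l, d.get? s = some l → ∀ x ∈ l, x ≤ i - 2 := fun l hl => hb s l rfl hl
      obtain ⟨l', t, heq, hlen, hlast, htle, hmem'⟩ := runA arr L (by omega) i d s hF hbs
      have hl'ne : l' ≠ [] := fun h => by rw [h] at hlast; simp at hlast
      have htmem := hmem' t (List.mem_of_getLast? hlast)
      -- split the index range at i + L
      have hlen_ss : ((s :: rest).length : Int) = (L : Int) + (rest'.length : Int) := by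
        have : rest.length = run.length + rest'.length := by rw [← hdecomp]; simp
        simp [this, hLdef]; ring
      have hsplit : PySem.List.pyRange i (i + ((s :: rest).length : Int)) 1
          = PySem.List.pyRange i (i + (L : Int)) 1
            ++ PySem.List.pyRange (i + (L : Int)) ((i + (L : Int)) + (rest'.length : Int)) 1 := by
        rw [show i + ((s :: rest).length : Int) = (i + (L : Int)) + (rest'.length : Int) from by
          rw [hlen_ss]; ring]
        exact PySem.List.pyRange_one_append _ _ _ (by omega) (by omega)
      set d1 := d.insert s ((d.getD s []) ++ l') with hd1
      set c1 := c.insert s (c.getD s 0 + ((L + 1 : Nat) / 2 : Nat)) with hc1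
      -- B over the run
      have harith : PySem.Int.floordiv ((run.length : Int) + 2) 2 = (((L + 1) / 2 : Nat) : Int) := by
        have h := PySem.Int.floordiv_natCast (run.length + 2) 2
        push_cast at h ⊢
        omega
      have hrunLoop : runLoop (s :: rest) c = runLoop rest' c1 := by
        rw [runLoop, ← hrun, ← hrest', harith, hc1]
      -- contains on both sides agree
      have hcc : d.contains s = c.contains s := by
        by_cases h : s ∈ d.keys
        · rw [(PySem.Dict.contains_iff_mem_keys d s).mpr h,
            (PySem.Dict.contains_iff_mem_keys c s).mpr (hk ▸ h)]
        · rw [Bool.eq_false_iff.mpr (fun hh => h ((PySem.Dict.contains_iff_mem_keys d s).mp hh)),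
            Bool.eq_false_iff.mpr (fun hh => h (hk ▸ (PySem.Dict.contains_iff_mem_keys c s).mp hh))]
      -- the invariant advances to i + L
      have hinv1 : LoopInv arr (i + (L : Int)) d1 c1 := by
        refine ⟨?_, ?_, ?_⟩
        · by_cases hcd : d.contains s = true
          · rw [hd1, hc1, PySem.Dict.keys_insert_of_contains _ _ hcd,
              PySem.Dict.keys_insert_of_contains _ _ (hcc ▸ hcd), hk]
          · have hcd' : d.contains s = false := by simpa using hcd
            rw [hd1, hc1, PySem.Dict.keys_insert_of_not_contains _ _ hcd',
              PySem.Dict.keys_insert_of_not_contains _ _ (hcc ▸ hcd'), hk]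
        · exact PySem.Dict.nodup_keys_insert _ _ _ hnd
        · intro k
          rcases eq_or_ne k s with rfl | hks
          · rw [hd1, hc1, PySem.Dict.get?_insert_self, PySem.Dict.get?_insert_self]
            refine ⟨?_, t, ?_, ?_⟩
            · -- count addition matches length addition
              rcases hget : d.get? k with _ | l0
              · have hcg : c.get? k = none := by
                  have := hv k; rw [hget] at this
                  cases hcgk : c.get? k 
                  · rfl
                  · rw [hcgk] at this; simp [RelI] at this
                rw [PySem.Dict.getD_of_get?_eq_none _ _ hget,
                  PySem.Dict.getD_of_get?_eq_none _ _ hcg]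
                simp [hlen]
              · have := hv k; rw [hget] at this
                rcases hcgk : c.get? k with _ | cnt
                · rw [hcgk] at this; simp [RelI] at this
                · rw [hcgk] at this
                  obtain ⟨hcnt, _⟩ := this
                  rw [PySem.Dict.getD_of_get?_eq_some _ _ hget,
                    PySem.Dict.getD_of_get?_eq_some _ _ hcgk, hcnt]
                  simp [hlen]
            · rw [getLast?_append_right hl'ne]
              exact hlast
            · intro x hx
              rcases List.mem_append.mp hx with hx | hx
              · -- an old element: < i, pair sum k, ≤ i-2 ≤ t
                rcases hget : d.get? k with _ | l0
                · rw [PySem.Dict.getD_of_get?_eq_none _ _ hget] at hx; simp at hx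
                · rw [PySem.Dict.getD_of_get?_eq_some _ _ hget] at hx
                  have hrel := hv k; rw [hget] at hrel
                  rcases hcgk : c.get? k with _ | cnt
                  · rw [hcgk] at hrel; simp [RelI] at hrel
                  · rw [hcgk] at hrel
                    obtain ⟨_, t0, _, hall⟩ := hrel
                    have h1 := hall x hx
                    have h2 := hbs l0 hget x hx
                    exact ⟨by omega, h1.2.1, by omega, h1.2.2.2⟩
              · have h1 := hmem' x hx
                exact ⟨h1.1, by omega, by omega, hF x h1.2 (by omega)⟩
          · rw [hd1, hc1, PySem.Dict.get?_insert_of_ne _ _ hks,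
              PySem.Dict.get?_insert_of_ne _ _ hks]
            exact relI_mono arr (by omega) (hv k)
      -- boundary condition for the next run: its sum differs from s
      have hb1 : ∀ s' l, rest'.head? = some s' → d1.get? s' = some l →
          ∀ x ∈ l, x ≤ (i + (L : Int)) - 2 := by
        intro s' l hhd hl x hx
        have hs's : s' ≠ s := by
          cases hr' : rest' with
          | nil => rw [hr'] at hhd; simp at hhd
          | cons a tl =>
            rw [hr'] at hhd; simp at hhd
            have hpa : (fun x => x == s) a = false := by
              have := List.head?_dropWhile_not (fun x => x == s) rest
              rw [← hrest', hr'] at this; simpa using this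
            simp at hpa; rw [← hhd]; exact hpa
        rw [hd1, PySem.Dict.get?_insert_of_ne _ _ hs's] at hl
        have hrel := hv s'; rw [hl] at hrel
        rcases hcgk : c.get? s' with _ | cnt
        · rw [hcgk] at hrel; simp [RelI] at hrel
        · rw [hcgk] at hrel
          obtain ⟨_, t0, _, hall⟩ := hrel
          have := (hall x hx).2.2.1
          omega
      -- index property of the remaining sums
      have hss1 : ∀ j : Nat, (hj : j < rest'.length) →
          rest'[j] = pairSum arr ((i + (L : Int)) + j) := by
        intro j hj
        have hkrest : run.length + j < rest.length := by rw [← hdecomp]; simp; omega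
        have hrr : rest'[j] = rest[run.length + j]'hkrest := by
          have h? : rest[run.length + j]? = rest'[j]? := by
            rw [← hdecomp, List.getElem?_append_right (by omega)]
            congr 1; omega
          rw [List.getElem?_eq_getElem hkrest, List.getElem?_eq_getElem hj] at h?
          exact (Option.some.inj h?).symm
        have := hss (run.length + j + 1) (by simp; omega)
        simp only [List.getElem_cons_succ] at this
        rw [hrr, this]
        show pairSum arr _ = pairSum arr _
        congr 1
        push_cast [hLdef]
        ring
      -- recurse
      have hrlen : rest'.length < N := by
        rw [← hN]; simp only [List.length_cons]
        have : rest'.length ≤ rest.length := by rw [← hdecomp]; simp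
        omega
      obtain ⟨hfin, hne⟩ := ih rest'.length hrlen rest' rfl (i + (L : Int)) d1 c1
        (by omega) hss1 hb1 hinv1
      have hd1ne : d1.keys ≠ [] := by
        intro h
        have : s ∈ d1.keys := by
          rw [hd1, PySem.Dict.mem_keys_insert]
          exact Or.inl rfl
        rw [h] at this; simp at this
      constructor
      · rw [hsplit, List.foldl_append, heq, hrunLoop]
        exact hfin
      · intro _
        rw [hsplit, List.foldl_append, heq]
        exact hne (Or.inl hd1ne)

-- ===== VERDICT (by name: the statement is the Claim_ definition above) =====
theorem solution_spec : Claim_equal_solution := by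
  intro arr _ hpre
  unfold Pre_solution at hpre
  unfold Spec_solution
  simp only [solution, solution_alt]
  set n1 : Int := (arr.length : Int) - 1 with hn1
  have hn1pos : 1 ≤ n1 := by omega
  -- A's init is its step at index 0 from the empty dict
  have hinit : stepA arr PySem.Dict.empty 0
      = (PySem.Dict.empty : PySem.Dict Int (List Int)).insert (pyGetD0 arr 0 + pyGetD0 arr 1) [0] := by
    norm_num [stepA, PySem.Dict.contains_empty, PySem.Dict.getD_insert_self,
      PySem.Dict.insert_insert_self]
  have hcons : PySem.List.pyRange 0 n1 1 = 0 :: PySem.List.pyRange 1 n1 1 := by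
    have h := PySem.List.pyRange_one_cons (a := 0) (b := n1) (by omega)
    simpa using h
  -- lengths
  have hsl : ((sumsList arr).length : Int) = n1 := by
    simp [sumsList, PySem.List.length_pyRange_one]
    omega
  have hslne : sumsList arr ≠ [] := by
    intro h
    rw [h] at hsl; simp at hsl; omega
  -- apply the simulation from the empty dicts
  have hmain := mainLoop arr (sumsList arr).length (sumsList arr) rfl 0
    PySem.Dict.empty PySem.Dict.empty le_rfl
    (by
      intro j hj
      have hj2 : j < arr.length - 1 := by
        simpa [sumsList, PySem.List.length_pyRange_one] using hj
      have hj' : j < (PySem.List.pyRange 0 n1 1).length := by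
        simp [PySem.List.length_pyRange_one, hn1]
        omega
      simp only [sumsList, List.getElem_map]
      rw [PySem.List.getElem_pyRange_one]
      simp [pairSum])
    (by intro s l _ hl; rw [PySem.Dict.get?_empty] at hl; cases hl)
    (by exact ⟨by simp, by simp, fun k => by simp [PySem.Dict.get?_empty, RelI]⟩)
  rw [show (0 : Int) + ((sumsList arr).length : Int) = n1 from by omega, hcons] at hmain
  simp only [List.foldl_cons, hinit] at hmain
  obtain ⟨⟨hk, hnd, hv⟩, hne⟩ := hmain
  have hdne := hne (Or.inr hslne)
  set dF := (PySem.List.pyRange 1 n1 1).foldl (stepA arr)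
    ((PySem.Dict.empty : PySem.Dict Int (List Int)).insert (pyGetD0 arr 0 + pyGetD0 arr 1) [0]) with hdF
  set cF := runLoop (sumsList arr) PySem.Dict.empty with hcF
  have hndc : cF.keys.Nodup := by rw [← hk]; exact hnd
  -- B's values are the lengths of A's values
  have hvals : cF.values = dF.values.map (fun l => (l.length : Int)) := by
    rw [PySem.Dict.values_eq_map_keys cF hndc 0, PySem.Dict.values_eq_map_keys dF hnd [], ← hk,
      List.map_map]
    refine List.map_congr_left fun k hkm => ?_
    simp only [Function.comp_apply]
    have hcd : dF.contains k = true := (PySem.Dict.contains_iff_mem_keys _ _).mpr hkm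
    obtain ⟨l, hl⟩ := get?_some_of_contains dF hcd
    have hrel := hv k; rw [hl] at hrel
    rcases hcg : cF.get? k with _ | cnt
    · rw [hcg] at hrel; simp [RelF] at hrel
    · rw [hcg] at hrel
      rw [PySem.Dict.getD_of_get?_eq_some _ _ hcg, PySem.Dict.getD_of_get?_eq_some _ _ hl]
      exact hrel
  have hvne : dF.values ≠ [] := by
    rw [PySem.Dict.values_eq_map_keys dF hnd []]
    simpa using hdne
  rw [hvals]
  obtain ⟨m, hm⟩ : ∃ m, PySem.List.max? dF.values (fun l => l.length) = some m := by
    cases h : PySem.List.max? dF.values (fun l => l.length) with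
    | none => exact absurd ((PySem.List.max?_eq_none_iff _ _).mp h) hvne
    | some m => exact ⟨m, rfl⟩
  obtain ⟨v, hv2⟩ : ∃ v, PySem.List.max? (dF.values.map (fun l => (l.length : Int)))
      (fun x => x) = some v := by
    cases h : PySem.List.max? (dF.values.map (fun l => (l.length : Int))) (fun x => x) with
    | none =>
      rw [PySem.List.max?_eq_none_iff] at h
      exact absurd (List.map_eq_nil_iff.mp h) hvne
    | some v => exact ⟨v, rfl⟩
  rw [hm, hv2]
  show (m.length : Int) = v
  have h1 := PySem.List.max?_isMax hm
  have h3 := PySem.List.max?_isMax hv2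
  have hmemm := PySem.List.max?_mem hm
  obtain ⟨l, hlmem, hlv⟩ := List.mem_map.mp (PySem.List.max?_mem hv2)
  have hlv' : (l.length : Int) = v := hlv
  have hle1 : (m.length : Int) ≤ v := h3 _ (List.mem_map.mpr ⟨m, hmemm, rfl⟩)
  have hle2 : l.length ≤ m.length := h1 _ hlmem
  omega
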